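-- pv_equiv track=rewrite | github.com/smart-spectral-matching/ssm-client-python | ssm_rest_python_client/io/jcamp.py | _parse_dataset_duplicate_characters
-- ===== SOURCE A (Python) =====
-- DUP_digits = {
--     'S': 1,
--     'T': 2,
--     'U': 3,
--     'V': 4,
--     'W': 5,
--     'X': 6,
--     'Y': 7,
--     'Z': 8,
--     's': 9,
-- }
--
-- def _parse_dataset_duplicate_characters(line: str) -> str:
--     """
--     Parse duplicate character compression for a line (i.e. DUP characters).
--     Valid DUP characters are: [S, T, U, V, W, X, Y, Z]
--
--     Example: Repeat 9 character 3 times with 'U'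
--         "9U" == "999"
--
--     Reference found on following site under "Compression Table"
--         - http://wwwchem.uwimona.edu.jm/software/jcampdx.html
--
--     Args:
--         line:
--             Line in JCAMP-DX file with duplicate characters (DUP)
--
--     Returns:
--         Processed line with duplicates added in
--     """
--     new_line = ""
--     for i, char in enumerate(line):
--         if (char in DUP_digits):
--             # Get number of duplicates to multiply by
--             # NOTE: subtract one since we will already have one character from
--             #       the original one we are duplicating from.
--             nduplicates = DUP_digits[char] - 1
--             new_line += line[i-1] * nduplicates
--         else:
--             new_line += char
--     return "".join(new_line)
-- ===== SOURCE B (Python) =====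
-- import re
--
-- DUP_digits = {
--     'S': 1,
--     'T': 2,
--     'U': 3,
--     'V': 4,
--     'W': 5,
--     'X': 6,
--     'Y': 7,
--     'Z': 8,
--     's': 9,
-- }
--
-- _DUP_RE = re.compile(r"[STUVWXYZs]")
--
--
-- def _parse_dataset_duplicate_characters(line: str) -> str:
--     # Let the regex engine find every DUP character; each match is replaced by
--     # (value - 1) copies of the character preceding it in the ORIGINAL line
--     # (line[-1] when the match is at position 0, just like line[i-1] there).
--     return _DUP_RE.sub(
--         lambda m: line[m.start() - 1] * (DUP_digits[m.group()] - 1), line)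
-- ===== Notes on version B (the rewrite author's own statement) =====
-- stated objective: idiomatic
-- what changed: B delegates the scan to a compiled regex: re.sub over the class [STUVWXYZs] with a callback that reads the predecessor from the original line by absolute index m.start()-1, replacing A's enumerate loop with string += accumulation.
import Mathlib
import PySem

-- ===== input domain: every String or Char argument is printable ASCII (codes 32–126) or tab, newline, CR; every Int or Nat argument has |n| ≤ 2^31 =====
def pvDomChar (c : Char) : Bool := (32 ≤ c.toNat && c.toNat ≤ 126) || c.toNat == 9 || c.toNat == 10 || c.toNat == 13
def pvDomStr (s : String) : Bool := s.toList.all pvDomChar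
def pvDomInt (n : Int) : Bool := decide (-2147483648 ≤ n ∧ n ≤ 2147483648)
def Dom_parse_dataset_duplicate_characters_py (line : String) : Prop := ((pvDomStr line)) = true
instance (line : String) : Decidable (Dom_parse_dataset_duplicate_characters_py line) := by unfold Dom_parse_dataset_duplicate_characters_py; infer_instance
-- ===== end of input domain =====

-- B replaces A's indexed loop by re.sub over the DUP character class with a callback
-- reading the predecessor from the original line by match position; objective: idiomatic.

def pvDUPDigits : PySem.Dict Char Int :=
  PySem.Dict.ofList [('S',1),('T',2),('U',3),('V',4),('W',5),('X',6),('Y',7),('Z',8),('s',9)]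

-- ===== PORT A =====
def parse_dataset_duplicate_characters_py (line : String) : String :=
  let cs := line.toList
  let new_line : List Char :=
    (PySem.List.enumerate cs 0).foldl (fun new_line ic =>
      if PySem.Dict.contains pvDUPDigits ic.2 then
        let nduplicates := PySem.Dict.getD pvDUPDigits ic.2 0 - 1
        new_line ++ (match PySem.List.pyGet? cs (ic.1 - 1) with
                     | some p => PySem.List.pyRepeat [p] nduplicates
                     | none => [])   -- unreachable: the loop runs only when cs ≠ [], so line[i-1] is in range
      else new_line ++ [ic.2]) []
  String.ofList new_line

-- ===== PORT B =====
-- Hand port of re.sub over the one-character class [STUVWXYZs] with a callback: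
-- the regex engine scans left to right; at each position a class character is a
-- match (start = current position) and is replaced by the callback's value,
-- any other character is copied through. Exact for a single-character pattern.
def pvReSubDup (line : List Char) : Nat → List Char → List Char
  | _, [] => []
  | start, c :: rest =>
    (if PySem.Dict.contains pvDUPDigits c then
       -- callback: line[m.start() - 1] * (DUP_digits[m.group()] - 1)
       match PySem.List.pyGet? line ((start : Int) - 1) with
       | some p => PySem.List.pyRepeat [p] (PySem.Dict.getD pvDUPDigits c 0 - 1)
       | none => []   -- unreachable: the scan runs only when line ≠ []
     else [c]) ++ pvReSubDup line (start + 1) rest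

def parse_dataset_duplicate_characters_py_alt (line : String) : String :=
  String.ofList (pvReSubDup line.toList 0 line.toList)

-- ===== PRECONDITION & SPEC =====
def Spec_parse_dataset_duplicate_characters_py (line : String) (out : String) : Prop := out = parse_dataset_duplicate_characters_py_alt line
instance (line : String) (out : String) : Decidable (Spec_parse_dataset_duplicate_characters_py line out) := by unfold Spec_parse_dataset_duplicate_characters_py; infer_instance

-- ===== CLAIM (what is proved, stated in full; the proofs are below) =====
def Claim_equal_parse_dataset_duplicate_characters_py : Prop := ∀ (line : String), Dom_parse_dataset_duplicate_characters_py line → Spec_parse_dataset_duplicate_characters_py line (parse_dataset_duplicate_characters_py line)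

-- ===== LEMMAS AND PROOFS =====

-- The expansion of one (index, char) pair, shared shape of both sides.
def pvExpand (cs : List Char) (ic : Int × Char) : List Char :=
  if PySem.Dict.contains pvDUPDigits ic.2 then
    match PySem.List.pyGet? cs (ic.1 - 1) with
    | some p => PySem.List.pyRepeat [p] (PySem.Dict.getD pvDUPDigits ic.2 0 - 1)
    | none => []
  else [ic.2]

-- B's regex scan is the flatMap of pvExpand over the enumerated suffix.
theorem pv_sub_eq_flatMap (cs : List Char) :
    ∀ (rest : List Char) (i : Nat),
      pvReSubDup cs i rest = (PySem.List.enumerate rest (i : Int)).flatMap (pvExpand cs) := by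
  intro rest
  induction rest with
  | nil => intro i; simp [pvReSubDup, PySem.List.enumerate_nil]
  | cons c t ih =>
    intro i
    rw [PySem.List.enumerate_cons, List.flatMap_cons]
    have : ((i : Int) + 1) = ((i + 1 : Nat) : Int) := by push_cast; ring
    rw [this, ← ih (i + 1)]
    simp [pvReSubDup, pvExpand]

theorem pv_main (line : String) :
    parse_dataset_duplicate_characters_py line = parse_dataset_duplicate_characters_py_alt line := by
  unfold parse_dataset_duplicate_characters_py parse_dataset_duplicate_characters_py_alt
  dsimp only
  congr 1
  set cs := line.toList with hcs
  have hstep := PySem.List.foldl_congr_mem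
      (l := PySem.List.enumerate cs) (init := ([] : List Char))
      (f := fun new_line (ic : Int × Char) =>
        if PySem.Dict.contains pvDUPDigits ic.2 then
          new_line ++ (match PySem.List.pyGet? cs (ic.1 - 1) with
           | some p => PySem.List.pyRepeat [p] (PySem.Dict.getD pvDUPDigits ic.2 0 - 1)
           | none => ([] : List Char))
        else new_line ++ [ic.2])
      (g := fun (acc : List Char) (ic : Int × Char) => acc ++ pvExpand cs ic)
      (by intro acc x hx; simp only [pvExpand]; split <;> rfl)
  rw [hstep, PySem.List.foldl_append_eq_flatMap, List.nil_append,
      pv_sub_eq_flatMap cs cs 0]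
  norm_num

-- ===== VERDICT (by name: the statement is the Claim_ definition above) =====
theorem parse_dataset_duplicate_characters_py_spec : Claim_equal_parse_dataset_duplicate_characters_py := by
  intro line _
  exact pv_main line
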